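-- pv_equiv track=rewrite | github.com/Pecske/DataVisualizer | src/py/service/BaseDataService.py | __map_columns_to_dummy_values
-- ===== SOURCE A (Python) =====
-- def __map_columns_to_dummy_values(column_names: list[str]) -> list[int]:
--     new_index: int = 0
--     column_values: dict[str, int] = dict()
--     for name in column_names:
--         if name not in column_values:
--             column_values[name] = new_index
--             new_index += 1
--     return list(column_values.values())
-- ===== SOURCE B (Python) =====
-- def __map_columns_to_dummy_values(column_names: list[str]) -> list[int]:
--     # A always assigns indices 0..k-1 to the k distinct names in order,
--     # so the returned values are exactly range(k) for k = number of distinct names.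
--     return list(range(len(set(column_names))))
-- ===== Notes on version B (the rewrite author's own statement) =====
-- stated objective: simpler
-- what changed: Replaces the dict-building loop with a closed form: the result is always range(k) where k is the number of distinct names, so B computes list(range(len(set(column_names)))).
import Mathlib
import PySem

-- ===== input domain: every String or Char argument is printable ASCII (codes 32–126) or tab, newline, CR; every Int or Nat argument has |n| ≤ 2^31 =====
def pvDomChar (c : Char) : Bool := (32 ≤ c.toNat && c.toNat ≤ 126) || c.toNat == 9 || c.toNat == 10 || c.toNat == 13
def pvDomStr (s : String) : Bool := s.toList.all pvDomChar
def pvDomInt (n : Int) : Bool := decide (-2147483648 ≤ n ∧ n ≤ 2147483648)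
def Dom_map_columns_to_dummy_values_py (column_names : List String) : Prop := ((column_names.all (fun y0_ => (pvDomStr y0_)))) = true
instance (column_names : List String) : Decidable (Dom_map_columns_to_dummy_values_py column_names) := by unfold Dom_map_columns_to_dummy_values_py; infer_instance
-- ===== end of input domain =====

-- B replaces A's dict-building loop by the closed form range(number of distinct names) — objective: simpler.

-- ===== PORT A =====
-- the loop body: if name not in column_values: column_values[name] = new_index; new_index += 1
def mapColsStepA (st : PySem.Dict String Int × Int) (name : String) : PySem.Dict String Int × Int :=
  if st.1.contains name = false then (st.1.insert name st.2, st.2 + 1) else st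

def map_columns_to_dummy_values_py (column_names : List String) : List Int :=
  (column_names.foldl mapColsStepA (PySem.Dict.empty, 0)).1.values

-- ===== PORT B =====
def map_columns_to_dummy_values_py_alt (column_names : List String) : List Int :=
  PySem.List.pyRange 0 ((PySem.Set.ofList column_names).length : Int) 1

-- ===== PRECONDITION & SPEC =====
def Spec_map_columns_to_dummy_values_py (column_names : List String) (out : List Int) : Prop := out = map_columns_to_dummy_values_py_alt column_names
instance (column_names : List String) (out : List Int) : Decidable (Spec_map_columns_to_dummy_values_py column_names out) := by unfold Spec_map_columns_to_dummy_values_py; infer_instance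

-- ===== CLAIM (what is proved, stated in full; the proofs are below) =====
def Claim_equal_map_columns_to_dummy_values_py : Prop := ∀ (column_names : List String), Dom_map_columns_to_dummy_values_py column_names → Spec_map_columns_to_dummy_values_py column_names (map_columns_to_dummy_values_py column_names)

-- ===== LEMMAS AND PROOFS =====

-- [0, 1, ..., n-1] as Ints
def rangeInts (n : Nat) : List Int := (List.range n).map Int.ofNat

lemma rangeInts_succ (n : Nat) : rangeInts (n + 1) = rangeInts n ++ [(n : Int)] := by
  simp [rangeInts, List.range_succ]

lemma keys_length_eq_size (d : PySem.Dict String Int) : d.keys.length = d.size := by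
  simp [PySem.Dict.keys, PySem.Dict.size]

-- Loop invariant: if the dict's values so far are 0..size-1 and the counter equals size,
-- then after the loop the values are 0..k-1 where k counts the distinct keys seen so far.
lemma mapCols_loop_values (l : List String) : ∀ (d : PySem.Dict String Int),
    d.values = rangeInts d.size →
    (l.foldl mapColsStepA (d, (d.size : Int))).1.values
      = rangeInts (PySem.Set.update d.keys l).length := by
  induction l with
  | nil =>
    intro d hv
    have : PySem.Set.update d.keys [] = d.keys := rfl
    simpa [this, keys_length_eq_size] using hv
  | cons name rest ih =>
    intro d hv
    by_cases hc : d.contains name = true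
    · -- existing key: the state is unchanged and the key-set does not grow
      have hm : name ∈ d.keys := (PySem.Dict.contains_iff_mem_keys d name).mp hc
      have hstep : mapColsStepA (d, (d.size : Int)) name = (d, (d.size : Int)) := by
        simp [mapColsStepA, hc]
      have hadd : PySem.Set.add d.keys name = d.keys := by
        simp [PySem.Set.add, PySem.Set.contains, hm]
      have hupd : PySem.Set.update d.keys (name :: rest) = PySem.Set.update d.keys rest := by
        show (name :: rest).foldl PySem.Set.add d.keys = _
        simp [List.foldl_cons, hadd]; rfl
      rw [List.foldl_cons, hstep, hupd]
      exact ih d hv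
    · -- new key: items/keys/values all append and the size grows by one
      have hc' : d.contains name = false := by simpa using hc
      have hstep : mapColsStepA (d, (d.size : Int)) name
          = (d.insert name (d.size : Int), (d.size : Int) + 1) := by
        simp [mapColsStepA, hc']
      have hitems : (d.insert name (d.size : Int)).items = d.items ++ [(name, (d.size : Int))] :=
        PySem.Dict.items_insert_of_not_contains d _ hc'
      have hsize : (d.insert name (d.size : Int)).size = d.size + 1 := by
        simp only [PySem.Dict.size] at hitems ⊢
        rw [hitems]; simp
      have hv' : (d.insert name (d.size : Int)).values = rangeInts (d.insert name (d.size : Int)).size := by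
        have : (d.insert name (d.size : Int)).values = d.values ++ [(d.size : Int)] := by
          simp [PySem.Dict.values, hitems]
        rw [this, hv, hsize, rangeInts_succ]
      have hkeys : (d.insert name (d.size : Int)).keys = d.keys ++ [name] :=
        PySem.Dict.keys_insert_of_not_contains d _ hc'
      have hnm : name ∉ d.keys := fun h =>
        absurd ((PySem.Dict.contains_iff_mem_keys d name).mpr h) (by simp [hc'])
      have hadd : PySem.Set.add d.keys name = d.keys ++ [name] := by
        simp [PySem.Set.add, PySem.Set.contains, hnm]
      have hupd : PySem.Set.update d.keys (name :: rest)
          = PySem.Set.update (d.insert name (d.size : Int)).keys rest := by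
        show (name :: rest).foldl PySem.Set.add d.keys = _
        rw [List.foldl_cons, hadd, ← hkeys]; rfl
      have hcast : ((d.size : Int) + 1) = ((d.insert name (d.size : Int)).size : Int) := by
        rw [hsize]; push_cast; ring
      rw [List.foldl_cons, hstep, hcast, hupd]
      exact ih _ hv'

-- ===== VERDICT (by name: the statement is the Claim_ definition above) =====
theorem map_columns_to_dummy_values_py_spec : Claim_equal_map_columns_to_dummy_values_py := by
  intro column_names _
  unfold Spec_map_columns_to_dummy_values_py map_columns_to_dummy_values_py map_columns_to_dummy_values_py_alt
  have h0 : (PySem.Dict.empty : PySem.Dict String Int).values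
      = rangeInts (PySem.Dict.empty : PySem.Dict String Int).size := by
    simp [PySem.Dict.empty, PySem.Dict.values, PySem.Dict.size, rangeInts]
  have h := mapCols_loop_values column_names PySem.Dict.empty h0
  have hupd : PySem.Set.update (PySem.Dict.empty : PySem.Dict String Int).keys column_names
      = PySem.Set.ofList column_names := rfl
  have hsz : ((PySem.Dict.empty : PySem.Dict String Int).size : Int) = 0 := by
    simp [PySem.Dict.empty, PySem.Dict.size]
  rw [hsz] at h
  rw [h, hupd, PySem.List.pyRange_zero_natCast]
  simp [rangeInts, Int.ofNat_eq_natCast]
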